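-- pv_equiv track=rewrite | github.com/HarshRajSahu007/Multi_Agent_Research_Development_Assistant | src/agent_ecosystem/experiment_agent.py | _extract_next_steps
-- ===== SOURCE A (Python) =====
-- from typing import Dict, Any, Optional, List
--
-- def _extract_next_steps(analysis_text: str) -> List[str]:
--     """Extract next steps from analysis."""
--     next_steps = []
--     lines = analysis_text.split('\n')
--
--     capturing = False
--     for line in lines:
--         if 'next steps' in line.lower():
--             capturing = True
--             continue
--         elif capturing and line.startswith(('1.', '2.', '3.', '-', '•')):
--             next_steps.append(line.strip())
--         elif capturing and line.strip() == '':
--             break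
--
--     return next_steps
-- ===== SOURCE B (Python) =====
-- from typing import List
--
-- _PREFIXES = ('1.', '2.', '3.', '-', '•')
--
-- def _extract_next_steps(analysis_text: str) -> List[str]:
--     """Declarative pipeline: locate the header index, filter out header lines from
--     the tail, cut at the first blank line's index, filter-map the bullet lines."""
--     lines = analysis_text.split('\n')
--     header = next((i for i, line in enumerate(lines) if 'next steps' in line.lower()), None)
--     if header is None:
--         return []
--     items = [line for line in lines[header + 1:] if 'next steps' not in line.lower()]
--     stop = next((i for i, line in enumerate(items) if line.strip() == ''), len(items))
--     return [line.strip() for line in items[:stop] if line.startswith(_PREFIXES)]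
-- ===== Notes on version B (the rewrite author's own statement) =====
-- stated objective: alternative
-- what changed: Replaces A's single-pass boolean capturing-flag state machine with a declarative pipeline: find the header line's index, filter 'next steps' lines out of the tail, truncate at the first blank line's index, then a comprehension strips the bullet lines.
import Mathlib
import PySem

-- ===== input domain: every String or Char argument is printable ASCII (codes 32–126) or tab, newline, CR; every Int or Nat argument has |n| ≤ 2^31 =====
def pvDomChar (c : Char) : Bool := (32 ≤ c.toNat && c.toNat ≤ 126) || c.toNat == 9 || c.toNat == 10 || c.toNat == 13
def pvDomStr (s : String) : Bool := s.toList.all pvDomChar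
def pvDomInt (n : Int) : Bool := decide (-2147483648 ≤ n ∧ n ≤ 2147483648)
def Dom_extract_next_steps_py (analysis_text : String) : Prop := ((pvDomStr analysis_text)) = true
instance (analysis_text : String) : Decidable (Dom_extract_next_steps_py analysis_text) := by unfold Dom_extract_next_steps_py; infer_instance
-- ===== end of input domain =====

-- B replaces A's boolean capturing-flag state machine with a declarative pipeline
-- (find header index, filter, truncate at first blank index, comprehension);
-- alternative decomposition, same cost; return-value equivalence, no mutation.

-- ===== PORT A =====
-- line.startswith(('1.', '2.', '3.', '-', '•'))  (tuple startswith = any of the prefixes)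
def pvStartsAny (line : String) : Bool :=
  PySem.Str.startswith line "1." || PySem.Str.startswith line "2." ||
  PySem.Str.startswith line "3." || PySem.Str.startswith line "-" ||
  PySem.Str.startswith line "•"

-- 'next steps' in line.lower()
def pvIsHdr (line : String) : Bool := PySem.Str.isIn "next steps" (PySem.Str.lower line)

-- the for-loop of A: state = (capturing flag, accumulated next_steps)
def pvALoop : List String → Bool → List String → List String
  | [], _, acc => acc
  | line :: rest, capturing, acc =>
    if pvIsHdr line then
      pvALoop rest true acc
    else if capturing && pvStartsAny line then
      pvALoop rest capturing (acc ++ [PySem.Str.strip line])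
    else if capturing && (PySem.Str.strip line == "") then
      acc
    else
      pvALoop rest capturing acc

def extract_next_steps_py (analysis_text : String) : List String :=
  -- split('\n'): separator is the nonempty literal "\n", so split? is always some
  let lines := (PySem.Str.split? analysis_text "\n").getD []
  pvALoop lines false []

-- ===== PORT B =====
-- next((i for i, x in enumerate(xs) if p x), <default>): first index satisfying p, as an Option
def pvFirstIdx (p : String → Bool) : List String → Option Nat
  | [] => none
  | line :: rest => if p line then some 0 else (pvFirstIdx p rest).map (· + 1)

def extract_next_steps_py_alt (analysis_text : String) : List String :=
  let lines := (PySem.Str.split? analysis_text "\n").getD []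
  match pvFirstIdx pvIsHdr lines with
  | none => []
  | some header =>
    -- lines[header+1:] with a nonnegative in-range start = drop
    let items := (lines.drop (header + 1)).filter (fun line => !pvIsHdr line)
    let stop := (pvFirstIdx (fun line => PySem.Str.strip line == "") items).getD items.length
    (items.take stop).filterMap
      (fun line => if pvStartsAny line then some (PySem.Str.strip line) else none)

-- ===== PRECONDITION & SPEC =====
def Spec_extract_next_steps_py (analysis_text : String) (out : List String) : Prop :=
  out = extract_next_steps_py_alt analysis_text
instance (analysis_text : String) (out : List String) : Decidable (Spec_extract_next_steps_py analysis_text out) := by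
  unfold Spec_extract_next_steps_py; infer_instance

-- ===== CLAIM =====
def Claim_equal_extract_next_steps_py : Prop :=
  ∀ (analysis_text : String), Dom_extract_next_steps_py analysis_text →
    Spec_extract_next_steps_py analysis_text (extract_next_steps_py analysis_text)

-- ===== LEMMAS AND PROOFS =====

-- B's phase 2+3 as one function of the remaining items
def pvPipe (items : List String) : List String :=
  (items.take ((pvFirstIdx (fun line => PySem.Str.strip line == "") items).getD items.length)).filterMap
    (fun line => if pvStartsAny line then some (PySem.Str.strip line) else none)

-- a bullet line has a non-whitespace first character, so it does not strip to ""
theorem strip_ne_empty_of_startsAny (l : String) (h : pvStartsAny l = true) :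
    (PySem.Str.strip l == "") = false := by
  have hhead : ∃ c rest, l.toList = c :: rest ∧ PySem.Chars.isspace c = false := by
    unfold pvStartsAny at h
    simp only [Bool.or_eq_true, PySem.Str.startswith_eq] at h
    rcases h with ((((h | h) | h) | h) | h) <;>
      rcases (PySem.Chars.startswith_iff _ _).mp h with ⟨t, ht⟩ <;>
      exact ⟨_, _, by simpa using ht.symm, by decide⟩
  rcases hhead with ⟨c, rest, hl, hc⟩
  have hstrip : (PySem.Str.strip l).toList =
      (List.dropWhile PySem.Chars.isspace (rest.reverse ++ [c])).reverse := by
    simp only [PySem.Str.toList_strip]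
    unfold PySem.Chars.strip PySem.Chars.lstrip PySem.Chars.rstrip
    rw [hl, List.dropWhile_cons_of_neg (by simp [hc])]
    simp
  have hne : (PySem.Str.strip l).toList ≠ [] := by
    rw [hstrip]
    intro hnil
    have : ∀ x ∈ rest.reverse ++ [c], PySem.Chars.isspace x := by
      rw [← List.dropWhile_eq_nil_iff]
      simpa using hnil
    have := this c (by simp)
    simp [hc] at this
  simp only [beq_eq_false_iff_ne, ne_eq]
  intro he
  exact hne (by simp [he])

-- cons-unfolding of the pipeline
theorem pvFirstIdx_cons (p : String → Bool) (l : String) (xs : List String) :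
    pvFirstIdx p (l :: xs) = if p l then some 0 else (pvFirstIdx p xs).map (· + 1) := rfl

theorem pvPipe_cons_blank (l : String) (xs : List String)
    (hb : (PySem.Str.strip l == "") = true) : pvPipe (l :: xs) = [] := by
  unfold pvPipe
  rw [pvFirstIdx_cons]
  simp [hb]

theorem pvPipe_cons_nonblank (l : String) (xs : List String)
    (hb : (PySem.Str.strip l == "") = false) :
    pvPipe (l :: xs) =
      (if pvStartsAny l then [PySem.Str.strip l] else []) ++ pvPipe xs := by
  have hstop : (pvFirstIdx (fun line => PySem.Str.strip line == "") (l :: xs)).getD (l :: xs).length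
      = ((pvFirstIdx (fun line => PySem.Str.strip line == "") xs).getD xs.length) + 1 := by
    rw [pvFirstIdx_cons]
    simp only [hb, Bool.false_eq_true, if_false, List.length_cons]
    cases pvFirstIdx (fun line => PySem.Str.strip line == "") xs <;> simp
  unfold pvPipe
  rw [hstop, List.take_succ_cons, List.filterMap_cons]
  by_cases hs : pvStartsAny l = true <;> simp [hs]

-- with the flag set, A's loop computes acc ++ pipeline of the header-filtered remainder
theorem pvALoop_true_eq_pipe (tail acc : List String) :
    pvALoop tail true acc = acc ++ pvPipe (tail.filter (fun line => !pvIsHdr line)) := by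
  induction tail generalizing acc with
  | nil => simp [pvALoop, pvPipe]
  | cons l rest ih =>
    by_cases hh : pvIsHdr l = true
    · rw [show pvALoop (l :: rest) true acc = pvALoop rest true acc from by
        simp [pvALoop, hh]]
      rw [ih, List.filter_cons_of_neg (by simp [hh])]
    · have hh' : pvIsHdr l = false := by simpa using hh
      rw [List.filter_cons_of_pos (by simp [hh'])]
      by_cases hs : pvStartsAny l = true
      · have hb := strip_ne_empty_of_startsAny l hs
        rw [show pvALoop (l :: rest) true acc = pvALoop rest true (acc ++ [PySem.Str.strip l]) from by
          simp [pvALoop, hh', hs]]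
        rw [ih, pvPipe_cons_nonblank l _ hb]
        simp [hs]
      · have hs' : pvStartsAny l = false := by simpa using hs
        by_cases hb : (PySem.Str.strip l == "") = true
        · rw [show pvALoop (l :: rest) true acc = acc from by
            simp [pvALoop, hh', hs', hb]]
          rw [pvPipe_cons_blank l _ hb]
          simp
        · have hb' : (PySem.Str.strip l == "") = false := by simpa using hb
          rw [show pvALoop (l :: rest) true acc = pvALoop rest true acc from by
            simp [pvALoop, hh', hs', hb']]
          rw [ih, pvPipe_cons_nonblank l _ hb']
          simp [hs']

-- with the flag clear, A's loop searches for the header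
theorem pvALoop_false_eq (lines acc : List String) :
    pvALoop lines false acc =
      match pvFirstIdx pvIsHdr lines with
      | none => acc
      | some h => pvALoop (lines.drop (h + 1)) true acc := by
  induction lines with
  | nil => rfl
  | cons l rest ih =>
    by_cases hh : pvIsHdr l = true
    · simp [pvALoop, pvFirstIdx, hh]
    · have hh' : pvIsHdr l = false := by simpa using hh
      rw [show pvALoop (l :: rest) false acc = pvALoop rest false acc from by
        simp [pvALoop, hh']]
      rw [ih, pvFirstIdx_cons]
      simp only [hh', Bool.false_eq_true, if_false]
      cases pvFirstIdx pvIsHdr rest <;> simp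

-- ===== VERDICT =====
theorem extract_next_steps_py_spec : Claim_equal_extract_next_steps_py := by
  intro analysis_text _
  unfold Spec_extract_next_steps_py extract_next_steps_py extract_next_steps_py_alt
  rw [pvALoop_false_eq]
  cases hfi : pvFirstIdx pvIsHdr ((PySem.Str.split? analysis_text "\n").getD []) with
  | none => simp [hfi]
  | some h =>
    simp only [hfi]
    simpa [pvPipe] using
      pvALoop_true_eq_pipe (((PySem.Str.split? analysis_text "\n").getD []).drop (h + 1)) []
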